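-- pv_equiv track=rewrite | github.com/ZhuoZhuoCrayon/my-Nodes | Python/tools/expression_utils/range2re.py | get_upper_range
-- ===== SOURCE A (Python) =====
-- from typing import List, Tuple
--
-- def get_upper_range(begin: int) -> Tuple[int, int]:
--     """
--     以begin为下界，获取可正则化的最大范围
--     大致规则如下：
--     取得的上界的位数=begin位数
--     将begin的最后一位变成9，得到的范围是可正则化的
--     从个位数起，若位值为0，将它上一位 置9得到的范围是可正则化的
--     """
--     end_str = str(begin)
--     for index in range(len(end_str) - 1, -1, -1):
--         if end_str[index] == "0":
--             end_str = "9".join([end_str[:index], end_str[index + 1:]])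
--         else:
--             end_str = "9".join([end_str[:index], end_str[index + 1:]])
--             break
--     return begin, int(end_str)
-- ===== SOURCE B (Python) =====
-- def get_upper_range(begin: int):
--     if begin == 0:
--         return (0, 9)
--     n = abs(begin)
--     t, p = n, 0
--     while t % 10 == 0:
--         t //= 10
--         p += 1
--     m = 10 ** (p + 1)
--     res = (n // m) * m + (m - 1)
--     return (begin, res if begin > 0 else -res)
-- ===== Notes on version B (the rewrite author's own statement) =====
-- stated objective: alternative
-- what changed: Replaces A's string conversion and right-to-left character scan/splice with pure integer arithmetic: count trailing zeros of |begin| by division, then compute the bound as (|begin|//m)*m + (m-1) with m = 10^(zeros+1), negating for negative input.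
import Mathlib
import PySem

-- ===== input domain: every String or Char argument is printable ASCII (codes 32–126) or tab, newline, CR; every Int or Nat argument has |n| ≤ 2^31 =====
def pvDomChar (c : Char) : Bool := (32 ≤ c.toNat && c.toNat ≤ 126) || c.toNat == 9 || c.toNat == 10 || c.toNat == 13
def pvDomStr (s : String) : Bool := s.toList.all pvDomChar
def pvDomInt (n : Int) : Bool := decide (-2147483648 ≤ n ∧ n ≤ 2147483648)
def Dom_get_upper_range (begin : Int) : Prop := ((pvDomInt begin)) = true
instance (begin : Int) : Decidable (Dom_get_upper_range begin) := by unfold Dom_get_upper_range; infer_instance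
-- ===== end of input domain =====

-- B replaces A's string scan/splice with pure integer arithmetic (alternative decomposition, same results).

-- ===== PORT A =====
-- the loop 'for index in range(len(end_str)-1, -1, -1)' with its break, index counting down;
-- end_str[index] is always in range here (0 ≤ index < len), so .getD never fires
def pvALoop : Nat → List Char → List Char
  | i, s =>
    -- end_str = "9".join([end_str[:index], end_str[index+1:]])
    let rep := PySem.Chars.join ['9'] [PySem.List.slice s none (some (i : Int)),
                                       PySem.List.slice s (some ((i : Int) + 1)) none]
    if (PySem.List.pyGet? s (i : Int)).getD ' ' = '0' then
      match i with
      | 0 => rep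
      | j + 1 => pvALoop j rep
    else rep

def get_upper_range (begin : Int) : Int × Int :=
  let s0 := PySem.Int.toChars begin        -- end_str = str(begin); never empty
  let s1 := pvALoop (s0.length - 1) s0
  (begin, (PySem.Int.ofChars? s1).getD 0)  -- int(end_str): always parses here, .getD never fires

-- ===== PORT B =====
-- while t % 10 == 0: t //= 10; p += 1   (t = |begin| > 0; the n = 0 guard is only for Lean totality)
def pvTrailing (n : Nat) : Nat :=
  if h : n = 0 then 0
  else if n % 10 = 0 then pvTrailing (n / 10) + 1 else 0
  decreasing_by exact Nat.div_lt_self (Nat.pos_of_ne_zero h) (by omega)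

def get_upper_range_alt (begin : Int) : Int × Int :=
  if begin = 0 then (0, 9)
  else
    let n : Nat := begin.natAbs
    let p : Nat := pvTrailing n
    let m : Nat := 10 ^ (p + 1)
    let res : Int := ((n / m) * m + (m - 1) : Nat)
    (begin, if 0 < begin then res else -res)

-- ===== PRECONDITION & SPEC =====
def Spec_get_upper_range (begin : Int) (out : Int × Int) : Prop := out = get_upper_range_alt begin
instance (begin : Int) (out : Int × Int) : Decidable (Spec_get_upper_range begin out) := by unfold Spec_get_upper_range; infer_instance

-- ===== CLAIM (what is proved, stated in full; the proofs are below) =====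
def Claim_equal_get_upper_range : Prop := ∀ (begin : Int), Dom_get_upper_range begin → Spec_get_upper_range begin (get_upper_range begin)

-- ===== LEMMAS AND PROOFS =====

-- clone of PySem.Int.ofChars? (whose digit-scanning helper is private), proved equal below
def pvGo : List Char → Bool → Nat → Option Nat
  | [], afterDigit, acc => if afterDigit = true then some acc else none
  | c :: rest, afterDigit, acc =>
      if c.isDigit = true then pvGo rest true (acc * 10 + (c.toNat - '0'.toNat))
      else
        if c = '_' ∧ afterDigit = true then
          match rest with
          | d :: _tail => if d.isDigit = true then pvGo rest false acc else none
          | [] => none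
        else none

def pvDigitsVal? : List Char → Option Nat
  | [] => none
  | cs => pvGo cs false 0

def pvOfChars? (s : List Char) : Option Int :=
  have cs := (List.dropWhile PySem.Int.isIntSpace (List.dropWhile PySem.Int.isIntSpace s).reverse).reverse
  match cs with
  | '-' :: ds => Option.map (fun n => -n) do
      let a ← pvDigitsVal? ds
      pure (↑a : Int)
  | '+' :: ds => Option.map (fun n => n) do
      let a ← pvDigitsVal? ds
      pure (↑a : Int)
  | ds => Option.map (fun n => n) do
      let a ← pvDigitsVal? ds
      pure (↑a : Int)

theorem clone_eq (s : List Char) : PySem.Int.ofChars? s = pvOfChars? s := by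
  unfold PySem.Int.ofChars? pvOfChars?
  simp only []
  split
  next ds heq =>
    rw [heq]; simp only []
    congr 1
    cases ds with
    | nil => rfl
    | cons c cs =>
      congr 1
      conv_lhs => whnf
      conv_rhs => whnf
      cases hdig : c.isDigit with
      | true =>
        conv_lhs => whnf
        conv_rhs => whnf
        generalize (0 * 10 + (c.toNat - '0'.toNat) : Nat) = acc
        generalize (true : Bool) = b
        clear heq hdig
        induction cs generalizing b acc with
        | nil => rfl
        | cons d cs' ih =>
          conv_lhs => whnf
          conv_rhs => whnf
          cases hd : d.isDigit with
          | true =>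
            conv_lhs => whnf
            conv_rhs => whnf
            exact ih _ _
          | false =>
            conv_lhs => whnf
            conv_rhs => whnf
            congr 1
            funext h
            cases cs' with
            | nil => rfl
            | cons e t =>
              simp only []
              by_cases he : e.isDigit = true
              · simp only [if_pos he]
                exact ih _ _
              · simp only [if_neg he]
      | false =>
        conv_lhs => whnf
        conv_rhs => whnf
        congr 1
        funext h
        exact absurd h (by simp)
  next ds heq =>
    rw [heq]; simp only []
    congr 1
    cases ds with
    | nil => rfl
    | cons c cs =>
      congr 1
      conv_lhs => whnf
      conv_rhs => whnf
      cases hdig : c.isDigit with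
      | true =>
        conv_lhs => whnf
        conv_rhs => whnf
        generalize (0 * 10 + (c.toNat - '0'.toNat) : Nat) = acc
        generalize (true : Bool) = b
        clear heq hdig
        induction cs generalizing b acc with
        | nil => rfl
        | cons d cs' ih =>
          conv_lhs => whnf
          conv_rhs => whnf
          cases hd : d.isDigit with
          | true =>
            conv_lhs => whnf
            conv_rhs => whnf
            exact ih _ _
          | false =>
            conv_lhs => whnf
            conv_rhs => whnf
            congr 1
            funext h
            cases cs' with
            | nil => rfl
            | cons e t =>
              simp only []
              by_cases he : e.isDigit = true
              · simp only [if_pos he]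
                exact ih _ _
              · simp only [if_neg he]
      | false =>
        conv_lhs => whnf
        conv_rhs => whnf
        congr 1
        funext h
        exact absurd h (by simp)
  next h1 h2 =>
    split
    next ds heq => exact (h1 ds heq).elim
    next ds heq => exact (h2 ds heq).elim
    next g1 g2 =>
      congr 1
      generalize (List.dropWhile PySem.Int.isIntSpace
        (List.dropWhile PySem.Int.isIntSpace s).reverse).reverse = t
      cases t with
      | nil => rfl
      | cons c cs =>
        congr 1
        conv_lhs => whnf
        conv_rhs => whnf
        cases hdig : c.isDigit with
        | true =>
          conv_lhs => whnf
          conv_rhs => whnf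
          generalize (0 * 10 + (c.toNat - '0'.toNat) : Nat) = acc
          generalize (true : Bool) = b
          clear hdig
          induction cs generalizing b acc with
          | nil => rfl
          | cons d cs' ih =>
            conv_lhs => whnf
            conv_rhs => whnf
            cases hd : d.isDigit with
            | true =>
              conv_lhs => whnf
              conv_rhs => whnf
              exact ih _ _
            | false =>
              conv_lhs => whnf
              conv_rhs => whnf
              congr 1
              funext h
              cases cs' with
              | nil => rfl
              | cons e t =>
                simp only []
                by_cases he : e.isDigit = true
                · simp only [if_pos he]
                  exact ih _ _
                · simp only [if_neg he]
        | false =>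
          conv_lhs => whnf
          conv_rhs => whnf
          congr 1
          funext h
          exact absurd h (by simp)


-- digit surgery at character / digit level (least-significant first on the right operand)
def pvNineC : List Char → List Char
  | [] => []
  | c :: cs => '9' :: (if c = '0' then pvNineC cs else cs)

def pvNineD : List Nat → List Nat
  | [] => []
  | d :: ds => 9 :: (if d = 0 then pvNineD ds else ds)

theorem pv_rep_eq (s : List Char) (i : Nat) :
    PySem.Chars.join ['9'] [PySem.List.slice s none (some (i : Int)),
                            PySem.List.slice s (some ((i : Int) + 1)) none]
      = s.take i ++ '9' :: s.drop (i + 1) := by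
  have h1 : ((i : Int) + 1) = ((i + 1 : Nat) : Int) := by push_cast; ring
  rw [h1, PySem.List.slice_to_natCast, PySem.List.slice_from_natCast,
    PySem.Chars.join_cons_cons, PySem.Chars.join_singleton]
  simp

theorem pv_loop (r : List Char) (h : ∃ c ∈ r, c ≠ '0') : ∀ (v u : List Char),
    pvALoop ((v ++ r.reverse).length - 1) (v ++ r.reverse ++ u)
      = v ++ (pvNineC r).reverse ++ u := by
  induction r with
  | nil => rcases h with ⟨c, hc, _⟩; simp at hc
  | cons c r' ih =>
    intro v u
    have hshape : v ++ (c :: r').reverse ++ u = (v ++ r'.reverse) ++ c :: u := by simp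
    have hidx : (v ++ (c :: r').reverse).length - 1 = (v ++ r'.reverse).length := by simp
    rw [hshape, hidx]
    rw [pvALoop.eq_def]
    simp only []
    rw [pv_rep_eq]
    have hget : (PySem.List.pyGet? ((v ++ r'.reverse) ++ c :: u)
        (((v ++ r'.reverse).length : Nat) : Int)).getD ' ' = c := by
      rw [PySem.List.pyGet?_natCast]
      rw [List.getElem?_append_right (le_refl _)]
      simp
    have htake : ((v ++ r'.reverse) ++ c :: u).take (v ++ r'.reverse).length = v ++ r'.reverse := by
      exact List.take_left' rfl
    have hdrop : ((v ++ r'.reverse) ++ c :: u).drop ((v ++ r'.reverse).length + 1) = u := by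
      have : (v ++ r'.reverse) ++ c :: u = ((v ++ r'.reverse) ++ [c]) ++ u := by simp
      rw [this]
      have hlen : (v ++ r'.reverse).length + 1 = ((v ++ r'.reverse) ++ [c]).length := by
        simp
        omega
      rw [hlen, List.drop_left]
    rw [hget, htake, hdrop]
    by_cases hc0 : c = '0'
    · subst hc0
      rw [if_pos rfl]
      have hr' : ∃ x ∈ r', x ≠ '0' := by
        rcases h with ⟨x, hx, hxne⟩
        rcases List.mem_cons.mp hx with rfl | hx'
        · exact absurd rfl hxne
        · exact ⟨x, hx', hxne⟩
      have hr'ne : r' ≠ [] := by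
        rcases hr' with ⟨x, hx, _⟩
        intro hnil; rw [hnil] at hx; simp at hx
      have hlen1 : 1 ≤ r'.length := by
        cases r' with
        | nil => exact absurd rfl hr'ne
        | cons _ _ => simp
      obtain ⟨j, hj⟩ : ∃ j, (v ++ r'.reverse).length = j + 1 :=
        ⟨(v ++ r'.reverse).length - 1, by simp; omega⟩
      rw [hj]
      simp only []
      have hj2 : j = (v ++ r'.reverse).length - 1 := by omega
      have hIH := ih hr' v ('9' :: u)
      rw [← hj2] at hIH
      rw [hIH]
      simp [pvNineC]
    · rw [if_neg (by simpa using hc0)]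
      simp [pvNineC, if_neg hc0]

theorem pv_tdc (f : Nat) : ∀ (n : Nat) (ds : List Char), 0 < n → n < f →
    Nat.toDigitsCore 10 f n ds = ((Nat.digits 10 n).map Nat.digitChar).reverse ++ ds := by
  induction f with
  | zero => intro n ds hn hf; omega
  | succ f ih =>
    intro n ds hn hf
    have step : Nat.toDigitsCore 10 (f + 1) n ds =
        (if n / 10 = 0 then (n % 10).digitChar :: ds
         else Nat.toDigitsCore 10 f (n / 10) ((n % 10).digitChar :: ds)) := rfl
    rw [step, Nat.digits_def' (by norm_num : (1:Nat) < 10) hn]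
    by_cases h0 : n / 10 = 0
    · simp [h0]
    · rw [if_neg h0, ih (n / 10) _ (Nat.pos_of_ne_zero h0) (by omega)]
      simp

theorem pv_todigits (n : Nat) (hn : 0 < n) :
    Nat.toDigits 10 n = ((Nat.digits 10 n).map Nat.digitChar).reverse := by
  have h : Nat.toDigits 10 n = Nat.toDigitsCore 10 (n + 1) n [] := rfl
  rw [h, pv_tdc (n + 1) n [] hn (by omega), List.append_nil]

theorem pv_digitChar_isDigit (d : Nat) (h : d < 10) : (Nat.digitChar d).isDigit = true := by
  interval_cases d <;> decide

theorem pv_digitChar_eq_zero (d : Nat) (h : d < 10) : Nat.digitChar d = '0' ↔ d = 0 := by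
  interval_cases d <;> simp_all <;> decide

theorem pv_digitChar_val (d : Nat) (h : d < 10) : (Nat.digitChar d).toNat - 48 = d := by
  interval_cases d <;> decide

theorem pv_nineC_map (ds : List Nat) (h : ∀ d ∈ ds, d < 10) :
    pvNineC (ds.map Nat.digitChar) = (pvNineD ds).map Nat.digitChar := by
  induction ds with
  | nil => rfl
  | cons d t ih =>
    have hd := h d (by simp)
    by_cases h0 : d = 0
    · subst h0
      simp only [List.map_cons, pvNineC, pvNineD, if_pos rfl]
      rw [if_pos (by decide)]
      rw [ih (fun x hx => h x (by simp [hx]))]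
      rfl
    · simp only [List.map_cons, pvNineC, pvNineD, if_neg h0]
      rw [if_neg (by simpa using (not_iff_not.mpr (pv_digitChar_eq_zero d hd)).mpr h0)]
      rfl

theorem pv_nineD_lt (ds : List Nat) (h : ∀ d ∈ ds, d < 10) : ∀ d ∈ pvNineD ds, d < 10 := by
  induction ds with
  | nil => simp [pvNineD]
  | cons d t ih =>
    intro x hx
    simp only [pvNineD, List.mem_cons] at hx
    rcases hx with hx | hx
    · omega
    · split at hx
      · exact ih (fun y hy => h y (by simp [hy])) x hx
      · exact h x (by simp [hx])

theorem pv_nineD_ne_nil (ds : List Nat) (h : ds ≠ []) : pvNineD ds ≠ [] := by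
  cases ds with
  | nil => exact absurd rfl h
  | cons d t => simp [pvNineD]

theorem pv_go_digits (cs : List Char) : ∀ (acc : Nat), (∀ c ∈ cs, c.isDigit = true) →
    pvGo cs true acc = some (cs.foldl (fun a c => a * 10 + (c.toNat - 48)) acc) := by
  induction cs with
  | nil => intro acc _; rfl
  | cons c t ih =>
    intro acc h
    have hc := h c (by simp)
    simp only [pvGo, if_pos hc, List.foldl_cons]
    have : '0'.toNat = 48 := rfl
    rw [this]
    exact ih _ (fun x hx => h x (by simp [hx]))

theorem pv_horner (l : List Nat) : ∀ (acc : Nat), (∀ d ∈ l, d < 10) →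
    ((l.map Nat.digitChar).reverse).foldl (fun a c => a * 10 + (c.toNat - 48)) acc
      = acc * 10 ^ l.length + Nat.ofDigits 10 l := by
  induction l with
  | nil => intro acc _; simp [Nat.ofDigits]
  | cons d t ih =>
    intro acc h
    have hd := h d (by simp)
    simp only [List.map_cons, List.reverse_cons, List.foldl_append, List.foldl_cons,
      List.foldl_nil]
    rw [ih acc (fun x hx => h x (by simp [hx])), pv_digitChar_val d hd,
      Nat.ofDigits_cons, List.length_cons]
    ring

theorem pv_isIntSpace_digit (c : Char) (h : c.isDigit = true) :
    PySem.Int.isIntSpace c = false := by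
  have hc : 48 ≤ c.toNat ∧ c.toNat ≤ 57 := by
    simp only [Char.isDigit] at h
    revert h
    simp only [decide_eq_true_eq, Bool.and_eq_true, Char.le_def]
    intro h
    exact ⟨h.1, h.2⟩
  simp only [PySem.Int.isIntSpace, Bool.or_eq_false_iff, decide_eq_false_iff_not]
  refine ⟨⟨⟨⟨⟨?_, ?_⟩, ?_⟩, ?_⟩, ?_⟩, ?_⟩ <;> rintro rfl <;> simp_all

theorem pv_strip_id (cs : List Char) (h : ∀ c ∈ cs, c.isDigit = true) :
    (List.dropWhile PySem.Int.isIntSpace (List.dropWhile PySem.Int.isIntSpace cs).reverse).reverse = cs := by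
  have hall : ∀ (l : List Char), (∀ c ∈ l, c.isDigit = true) → List.dropWhile PySem.Int.isIntSpace l = l := by
    intro l hl
    cases l with
    | nil => rfl
    | cons c t =>
      simp [List.dropWhile, pv_isIntSpace_digit c (hl c (by simp))]
  rw [hall cs h, hall cs.reverse (fun c hc => h c (List.mem_reverse.mp hc)), List.reverse_reverse]

theorem pv_pvOfChars_digits (c : Char) (cs : List Char) (h : ∀ x ∈ c :: cs, x.isDigit = true) :
    pvOfChars? (c :: cs) = some (((c :: cs).foldl (fun a x => a * 10 + (x.toNat - 48)) 0 : Nat) : Int) := by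
  unfold pvOfChars?
  simp only []
  rw [pv_strip_id (c :: cs) h]
  have hgo : pvDigitsVal? (c :: cs)
      = some ((c :: cs).foldl (fun a x => a * 10 + (x.toNat - 48)) 0) := by
    have h1 : pvDigitsVal? (c :: cs) = pvGo (c :: cs) false 0 := rfl
    have hc := h c (by simp)
    rw [h1]
    simp only [pvGo, if_pos hc]
    have h48 : '0'.toNat = 48 := rfl
    rw [h48, pv_go_digits cs _ (fun x hx => h x (by simp [hx])), List.foldl_cons]
  split
  next ds heq =>
    exfalso
    have : c = '-' := by simpa using congrArg (List.head? ·) heq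
    subst this
    simpa using h '-' (by simp)
  next ds heq =>
    exfalso
    have : c = '+' := by simpa using congrArg (List.head? ·) heq
    subst this
    simpa using h '+' (by simp)
  next g1 g2 =>
    rw [hgo]
    rfl

theorem pv_pvOfChars_neg_digits (c : Char) (cs : List Char) (h : ∀ x ∈ c :: cs, x.isDigit = true) :
    pvOfChars? ('-' :: c :: cs) = some (-(((c :: cs).foldl (fun a x => a * 10 + (x.toNat - 48)) 0 : Nat) : Int)) := by
  unfold pvOfChars?
  simp only []
  have hstrip : (List.dropWhile PySem.Int.isIntSpace
      (List.dropWhile PySem.Int.isIntSpace ('-' :: c :: cs)).reverse).reverse = '-' :: c :: cs := by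
    have h1 : List.dropWhile PySem.Int.isIntSpace ('-' :: c :: cs) = '-' :: c :: cs := by
      simp [List.dropWhile, PySem.Int.isIntSpace]
    have hall : List.dropWhile PySem.Int.isIntSpace ('-' :: c :: cs).reverse = ('-' :: c :: cs).reverse := by
      have hh : ('-' :: c :: cs).reverse = (c :: cs).reverse ++ ['-'] := by simp
      cases hrev : (c :: cs).reverse with
      | nil => exact absurd (congrArg List.length hrev) (by simp)
      | cons y t =>
        have hy : y.isDigit = true := by
          have : y ∈ (c :: cs).reverse := by rw [hrev]; simp
          exact h y (List.mem_reverse.mp this)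
        rw [hh, hrev]
        simp [List.dropWhile, pv_isIntSpace_digit y hy]
    rw [h1, hall, List.reverse_reverse]
  rw [hstrip]
  have hgo : pvDigitsVal? (c :: cs)
      = some ((c :: cs).foldl (fun a x => a * 10 + (x.toNat - 48)) 0) := by
    have h1 : pvDigitsVal? (c :: cs) = pvGo (c :: cs) false 0 := rfl
    have hc := h c (by simp)
    rw [h1]
    simp only [pvGo, if_pos hc]
    have h48 : '0'.toNat = 48 := rfl
    rw [h48, pv_go_digits cs _ (fun x hx => h x (by simp [hx])), List.foldl_cons]
  simp only []
  rw [hgo]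
  rfl

theorem pv_parse (l : List Nat) (hne : l ≠ []) (h : ∀ d ∈ l, d < 10) :
    PySem.Int.ofChars? ((l.map Nat.digitChar).reverse) = some ((Nat.ofDigits 10 l : Nat) : Int) := by
  have hdig : ∀ x ∈ (l.map Nat.digitChar).reverse, x.isDigit = true := by
    intro x hx
    obtain ⟨d, hd, rfl⟩ := List.mem_map.mp (List.mem_reverse.mp hx)
    exact pv_digitChar_isDigit d (h d hd)
  cases hcs : (l.map Nat.digitChar).reverse with
  | nil =>
    exfalso
    have := congrArg List.length hcs
    simp at this
    exact hne this
  | cons c cs =>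
    have hv : (c :: cs).foldl (fun a x => a * 10 + (x.toNat - 48)) 0 = Nat.ofDigits 10 l := by
      rw [← hcs, pv_horner l 0 h]
      simp
    rw [hcs] at hdig
    rw [clone_eq, pv_pvOfChars_digits c cs hdig, hv]

theorem pv_parse_neg (l : List Nat) (hne : l ≠ []) (h : ∀ d ∈ l, d < 10) :
    PySem.Int.ofChars? ('-' :: (l.map Nat.digitChar).reverse)
      = some (-((Nat.ofDigits 10 l : Nat) : Int)) := by
  have hdig : ∀ x ∈ (l.map Nat.digitChar).reverse, x.isDigit = true := by
    intro x hx
    obtain ⟨d, hd, rfl⟩ := List.mem_map.mp (List.mem_reverse.mp hx)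
    exact pv_digitChar_isDigit d (h d hd)
  cases hcs : (l.map Nat.digitChar).reverse with
  | nil =>
    exfalso
    have := congrArg List.length hcs
    simp at this
    exact hne this
  | cons c cs =>
    have hv : (c :: cs).foldl (fun a x => a * 10 + (x.toNat - 48)) 0 = Nat.ofDigits 10 l := by
      rw [← hcs, pv_horner l 0 h]
      simp
    rw [hcs] at hdig
    rw [clone_eq, pv_pvOfChars_neg_digits c cs hdig, hv]

theorem pv_nineval (n : Nat) (hn : 0 < n) :
    Nat.ofDigits 10 (pvNineD (Nat.digits 10 n))
      = (n / 10 ^ (pvTrailing n + 1)) * 10 ^ (pvTrailing n + 1) + (10 ^ (pvTrailing n + 1) - 1) := by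
  induction n using Nat.strong_induction_on with
  | _ n ih =>
    rw [Nat.digits_def' (by norm_num : (1:Nat) < 10) hn]
    by_cases hmod : n % 10 = 0
    · have hdiv : 0 < n / 10 := Nat.div_pos (by omega) (by omega)
      rw [hmod]
      have hnine : pvNineD (0 :: Nat.digits 10 (n / 10)) = 9 :: pvNineD (Nat.digits 10 (n / 10)) := by
        simp [pvNineD]
      rw [hnine, Nat.ofDigits_cons, ih (n / 10) (Nat.div_lt_self hn (by omega)) hdiv]
      have hp : pvTrailing n = pvTrailing (n / 10) + 1 := by
        rw [pvTrailing]
        simp [(show ¬ n = 0 by omega), hmod]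
      rw [hp]
      set p := pvTrailing (n / 10) with hpdef
      have hM : (0:Nat) < 10 ^ (p + 1) := pow_pos (by omega : (0:Nat) < 10) (p + 1)
      have hdd : n / 10 ^ (p + 1 + 1) = (n / 10) / 10 ^ (p + 1) := by
        rw [Nat.div_div_eq_div_mul]
        congr 1
        ring
      rw [hdd]
      set q := (n / 10) / 10 ^ (p + 1) with hqdef
      have hpow : (10:Nat) ^ (p + 1 + 1) = 10 ^ (p + 1) * 10 := by ring
      rw [hpow]
      set M := (10:Nat) ^ (p + 1) with hMdef
      ring_nf
      omega
    · have hp : pvTrailing n = 0 := by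
        rw [pvTrailing]
        simp [(show ¬ n = 0 by omega), hmod]
      have hnine : pvNineD (n % 10 :: Nat.digits 10 (n / 10)) = 9 :: Nat.digits 10 (n / 10) := by
        simp [pvNineD, hmod]
      rw [hnine, Nat.ofDigits_cons, Nat.ofDigits_digits, hp]
      have : (10:Nat) ^ (0 + 1) = 10 := by norm_num
      rw [this]
      omega

theorem pv_abs_case (n : Nat) (hn : 0 < n) :
    pvALoop ((((Nat.digits 10 n).map Nat.digitChar).reverse).length - 1)
        (((Nat.digits 10 n).map Nat.digitChar).reverse)
      = (((pvNineD (Nat.digits 10 n)).map Nat.digitChar).reverse) := by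
  have hne : Nat.digits 10 n ≠ [] := Nat.digits_ne_nil_iff_ne_zero.mpr (by omega)
  have hlt : ∀ d ∈ Nat.digits 10 n, d < 10 :=
    fun d hd => Nat.digits_lt_base (by norm_num) hd
  have hcond : ∃ c ∈ (Nat.digits 10 n).map Nat.digitChar, c ≠ '0' := by
    refine ⟨Nat.digitChar ((Nat.digits 10 n).getLast hne),
      List.mem_map_of_mem (List.getLast_mem hne), ?_⟩
    have hlast := Nat.getLast_digit_ne_zero 10 (show n ≠ 0 by omega)
    have hlastlt : (Nat.digits 10 n).getLast hne < 10 :=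
      hlt _ (List.getLast_mem hne)
    intro hz
    exact hlast ((pv_digitChar_eq_zero _ hlastlt).mp hz)
  have := pv_loop ((Nat.digits 10 n).map Nat.digitChar) hcond [] []
  simpa [pv_nineC_map _ hlt] using this

theorem pv_neg_case (n : Nat) (hn : 0 < n) :
    pvALoop (('-' :: ((Nat.digits 10 n).map Nat.digitChar).reverse).length - 1)
        ('-' :: ((Nat.digits 10 n).map Nat.digitChar).reverse)
      = '-' :: (((pvNineD (Nat.digits 10 n)).map Nat.digitChar).reverse) := by
  have hne : Nat.digits 10 n ≠ [] := Nat.digits_ne_nil_iff_ne_zero.mpr (by omega)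
  have hlt : ∀ d ∈ Nat.digits 10 n, d < 10 :=
    fun d hd => Nat.digits_lt_base (by norm_num) hd
  have hcond : ∃ c ∈ (Nat.digits 10 n).map Nat.digitChar, c ≠ '0' := by
    refine ⟨Nat.digitChar ((Nat.digits 10 n).getLast hne),
      List.mem_map_of_mem (List.getLast_mem hne), ?_⟩
    have hlast := Nat.getLast_digit_ne_zero 10 (show n ≠ 0 by omega)
    have hlastlt : (Nat.digits 10 n).getLast hne < 10 :=
      hlt _ (List.getLast_mem hne)
    intro hz
    exact hlast ((pv_digitChar_eq_zero _ hlastlt).mp hz)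
  have := pv_loop ((Nat.digits 10 n).map Nat.digitChar) hcond ['-'] []
  simpa [pv_nineC_map _ hlt] using this

-- ===== VERDICT (by name: the statement is the Claim_ definition above) =====
theorem get_upper_range_spec : Claim_equal_get_upper_range := by
  intro begin _
  unfold Spec_get_upper_range
  by_cases hz : begin = 0
  · subst hz; decide
  · have hlt : ∀ d ∈ Nat.digits 10 begin.natAbs, d < 10 :=
      fun d hd => Nat.digits_lt_base (by norm_num) hd
    have hnabs : 0 < begin.natAbs := Int.natAbs_pos.mpr hz
    have hne : Nat.digits 10 begin.natAbs ≠ [] :=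
      Nat.digits_ne_nil_iff_ne_zero.mpr (by omega)
    have hvalue := pv_nineval begin.natAbs hnabs
    have hnineLt := pv_nineD_lt (Nat.digits 10 begin.natAbs) hlt
    have hnineNe := pv_nineD_ne_nil (Nat.digits 10 begin.natAbs) hne
    by_cases hpos : 0 < begin
    · have htoNat : begin.toNat = begin.natAbs := by omega
      have hchars : PySem.Int.toChars begin
          = ((Nat.digits 10 begin.natAbs).map Nat.digitChar).reverse := by
        rw [PySem.Int.toChars, if_neg (by omega), htoNat, pv_todigits _ hnabs]
      unfold get_upper_range
      simp only []
      rw [hchars, pv_abs_case _ hnabs, pv_parse _ hnineNe hnineLt]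
      unfold get_upper_range_alt
      rw [if_neg hz]
      simp only []
      rw [if_pos hpos]
      simp only [Option.getD_some, Prod.mk.injEq, true_and]
      rw [hvalue]
    · have hneg : begin < 0 := by omega
      have hchars : PySem.Int.toChars begin
          = '-' :: ((Nat.digits 10 begin.natAbs).map Nat.digitChar).reverse := by
        rw [PySem.Int.toChars, if_pos hneg, pv_todigits _ hnabs]
      unfold get_upper_range
      simp only []
      rw [hchars, pv_neg_case _ hnabs, pv_parse_neg _ hnineNe hnineLt]
      unfold get_upper_range_alt
      rw [if_neg hz]
      simp only []
      rw [if_neg hpos]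
      simp only [Option.getD_some, Prod.mk.injEq, true_and]
      rw [hvalue]
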